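-- pv_equiv track=rewrite | github.com/kavishme/udc_train | category_sep.py | toColumns
-- ===== SOURCE A (Python) =====
-- def toColumns(p):
--     ques = {}
--     tags = list(p.keys())
--
--     for tag in tags:
--         for q in p[tag]:
--
--             if q not in ques:
--                 ques[q] = [0]*len(tags)
--
--             i = tags.index(tag)
--             ques[q][i] = 1
--
--     return ques, tags
-- ===== SOURCE B (Python) =====
-- def toColumns(p):
--     tags = list(p.keys())
--     n = len(tags)
--     membership = {}
--     for i, tag in enumerate(tags):
--         for q in p[tag]:
--             membership.setdefault(q, set()).add(i)
--     ques = {q: [1 if j in idxs else 0 for j in range(n)] for q, idxs in membership.items()}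
--     return ques, tags
-- ===== Notes on version B (the rewrite author's own statement) =====
-- stated objective: alternative
-- what changed: A's single combined loop (which re-scans tags with tags.index per question and mutates per-question vectors in place) is replaced by two passes: an enumerate-driven index pass building question -> set of tag indices, then a separate pass constructing each one-hot vector from its index set.
import Mathlib
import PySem

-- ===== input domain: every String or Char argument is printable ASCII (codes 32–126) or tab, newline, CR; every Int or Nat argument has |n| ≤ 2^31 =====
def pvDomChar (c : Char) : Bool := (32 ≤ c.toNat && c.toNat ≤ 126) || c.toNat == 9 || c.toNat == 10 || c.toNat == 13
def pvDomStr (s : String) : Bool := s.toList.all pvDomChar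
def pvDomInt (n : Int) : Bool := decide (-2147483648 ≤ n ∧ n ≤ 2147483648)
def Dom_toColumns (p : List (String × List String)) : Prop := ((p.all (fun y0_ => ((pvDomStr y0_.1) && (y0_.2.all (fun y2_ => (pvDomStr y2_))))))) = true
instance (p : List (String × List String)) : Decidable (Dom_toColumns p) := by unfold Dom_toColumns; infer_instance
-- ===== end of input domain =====

-- B splits A's combined loop into an index-building pass (question → set of tag indices, via
-- enumerate, removing the inner tags.index scan) and a second pass constructing each one-hot
-- vector from the collected indices; objective: alternative decomposition. No mutation of p.

-- ===== PORT A =====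
-- p[tag]: dict lookup on the association list (first match; never raises here since tag ∈ keys)
def pvLookup (p : List (String × List String)) (tag : String) : List String :=
  ((p.find? (fun y => y.1 == tag)).map Prod.snd).getD []

def toColumns (p : List (String × List String)) : (List (String × List Int)) × List String :=
  let tags := p.map Prod.fst
  let ques :=
    tags.foldl (fun ques tag =>
      (pvLookup p tag).foldl (fun ques q =>
        let ques := if ques.contains q then ques else ques.insert q (List.replicate tags.length (0 : Int))
        let i := (PySem.List.index? tags tag).getD 0   -- tags.index(tag); tag ∈ tags, so never raises
        ques.modify q [] (fun v => v.set i 1)) ques)   -- ques[q][i] = 1 (i < len(tags) always)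
      PySem.Dict.empty
  (ques.items, tags)

-- ===== PORT B =====
def toColumns_alt (p : List (String × List String)) : (List (String × List Int)) × List String :=
  let tags := p.map Prod.fst
  let n : Int := tags.length
  let memb :=
    (PySem.List.enumerate tags).foldl (fun memb it =>
      (pvLookup p it.2).foldl (fun memb q =>
        memb.modify q ([] : PySem.Set Int) (fun s => PySem.Set.add s it.1)) memb)  -- setdefault(q,set()).add(i)
      PySem.Dict.empty
  let ques := memb.items.map (fun qi =>
    (qi.1, (PySem.List.pyRange 0 n 1).map (fun j => if qi.2.contains j then (1 : Int) else 0)))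
  (ques, tags)

-- ===== PRECONDITION & SPEC =====
-- Pre_ excludes association lists with a repeated key: a Python dict (A's actual input) cannot
-- contain duplicate keys, so such lists represent no input A is ever called on.
def Pre_toColumns (p : List (String × List String)) : Prop := (p.map Prod.fst).Nodup
instance (p : List (String × List String)) : Decidable (Pre_toColumns p) := by unfold Pre_toColumns; infer_instance

def pvWitness_toColumns : (List (String × List String)) := [("a", ["x", "y"]), ("b", ["x"])]

def Spec_toColumns (p : List (String × List String)) (out : (List (String × List Int)) × List String) : Prop := out = toColumns_alt p
instance (p : List (String × List String)) (out : (List (String × List Int)) × List String) : Decidable (Spec_toColumns p out) := by unfold Spec_toColumns; infer_instance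

-- ===== CLAIM (what is proved, stated in full; the proofs are below) =====
def Claim_equal_toColumns : Prop := ∀ (p : List (String × List String)), Dom_toColumns p → Pre_toColumns p → Spec_toColumns p (toColumns p)

-- ===== LEMMAS AND PROOFS =====

-- the one-hot vector B builds from a set of indices (definitionally B's map body)
def pvVec (n : Int) (s : PySem.Set Int) : List Int :=
  (PySem.List.pyRange 0 n 1).map (fun j => if s.contains j then (1 : Int) else 0)

-- B's membership dict rendered as A's dict of one-hot vectors (the simulation relation)
def pvMapVec (n : Int) (m : PySem.Dict String (PySem.Set Int)) : PySem.Dict String (List Int) :=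
  ⟨m.items.map (fun qi => (qi.1, pvVec n qi.2))⟩

theorem pvSet_contains_add (x y : Int) (s : PySem.Set Int) :
    (PySem.Set.add s x).contains y = (y == x || s.contains y) := by
  simp only [PySem.Set.add]
  split_ifs with h
  · by_cases hyx : y = x <;> simp_all [List.contains_eq_mem]
  · simp [List.contains_eq_mem, Bool.or_comm, beq_eq_decide]

theorem pvVec_nil (nn : Nat) : pvVec (nn : Int) [] = List.replicate nn (0 : Int) := by
  apply List.ext_getElem
  · simp [pvVec, PySem.List.length_pyRange_one]
  · intro j h1 h2; simp [pvVec]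

theorem pvVec_add (nn : Nat) (i : Nat) (s : PySem.Set Int) :
    pvVec (nn : Int) (PySem.Set.add s (i : Int)) = (pvVec (nn : Int) s).set i 1 := by
  apply List.ext_getElem
  · simp [pvVec, PySem.List.length_pyRange_one]
  · intro j h1 h2
    have hj : j < nn := by simpa [pvVec, PySem.List.length_pyRange_one] using h1
    have hlen : j < (PySem.List.pyRange 0 (nn:Int) 1).length := by
      simpa [PySem.List.length_pyRange_one] using hj
    simp only [pvVec, List.getElem_set, List.getElem_map, PySem.List.getElem_pyRange_one,
      zero_add, pvSet_contains_add]
    by_cases hij : i = j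
    · subst hij; simp
    · have : ((j : Int) == (i : Int)) = false := by simp; omega
      simp [this, hij]

theorem pv_contains_mapVec (n : Int) (m : PySem.Dict String (PySem.Set Int)) (q : String) :
    (pvMapVec n m).contains q = m.contains q := by
  simp [pvMapVec, PySem.Dict.contains, List.any_map, Function.comp_def]

theorem pv_get?_mapVec (n : Int) (m : PySem.Dict String (PySem.Set Int)) (q : String) :
    (pvMapVec n m).get? q = (m.get? q).map (pvVec n) := by
  simp [pvMapVec, PySem.Dict.get?, List.find?_map, Option.map_map, Function.comp_def]

theorem pv_insert_mapVec (n : Int) (m : PySem.Dict String (PySem.Set Int)) (q : String)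
    (s : PySem.Set Int) :
    pvMapVec n (m.insert q s) = (pvMapVec n m).insert q (pvVec n s) := by
  by_cases h : m.contains q
  · have h2 : (pvMapVec n m).contains q = true := by rw [pv_contains_mapVec]; exact h
    apply PySem.Dict.ext
    rw [PySem.Dict.items_insert_of_contains _ _ h2]
    show (m.insert q s).items.map _ = _
    rw [PySem.Dict.items_insert_of_contains _ _ h]
    simp only [pvMapVec, List.map_map]
    apply List.map_congr_left
    intro x _
    by_cases hxq : x.1 = q <;> simp [hxq]
  · have h' : m.contains q = false := by simpa using h
    have h2 : (pvMapVec n m).contains q = false := by rw [pv_contains_mapVec]; exact h'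
    apply PySem.Dict.ext
    rw [PySem.Dict.items_insert_of_not_contains _ _ h2]
    show (m.insert q s).items.map _ = _
    rw [PySem.Dict.items_insert_of_not_contains _ _ h']
    simp [pvMapVec]

-- one event (question q under tag index i): A's ensure-then-set equals B's index collection
theorem pv_step_comm (nn : Nat) (i : Nat) (m : PySem.Dict String (PySem.Set Int)) (q : String) :
    (let d := pvMapVec (nn : Int) m
     let d := if d.contains q then d else d.insert q (List.replicate nn (0 : Int))
     d.modify q [] (fun v => v.set i 1))
    = pvMapVec (nn : Int) (m.modify q ([] : PySem.Set Int) (fun s => PySem.Set.add s (i : Int))) := by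
  show (if (pvMapVec (nn:Int) m).contains q then pvMapVec (nn:Int) m
        else (pvMapVec (nn:Int) m).insert q (List.replicate nn (0:Int))).modify q []
          (fun v => v.set i 1) = _
  rw [pv_contains_mapVec]
  by_cases h : m.contains q
  · simp only [h, if_pos]
    obtain ⟨s, hs⟩ : ∃ s, m.get? q = some s := by
      rw [PySem.Dict.contains_eq_isSome_get?] at h
      exact Option.isSome_iff_exists.mp h
    have hgdA : (pvMapVec (nn:Int) m).getD q [] = pvVec (nn:Int) s := by
      simp [PySem.Dict.getD, pv_get?_mapVec, hs]
    have hgdB : m.getD q ([] : PySem.Set Int) = s := by simp [PySem.Dict.getD, hs]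
    show (pvMapVec (nn:Int) m).insert q (((pvMapVec (nn:Int) m).getD q []).set i 1) = _
    rw [hgdA]
    show _ = pvMapVec (nn:Int) (m.insert q (PySem.Set.add (m.getD q []) (i:Int)))
    rw [hgdB, pv_insert_mapVec, pvVec_add]
  · have h' : m.contains q = false := by simpa using h
    simp only [h, if_neg, Bool.false_eq_true, not_false_iff]
    show ((pvMapVec (nn:Int) m).insert q (List.replicate nn (0:Int))).modify q []
          (fun v => v.set i 1) = _
    rw [show ∀ (d : PySem.Dict String (List Int)), d.modify q [] (fun v => v.set i 1)
          = d.insert q ((d.getD q []).set i 1) from fun d => rfl]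
    rw [PySem.Dict.getD_eq_get?_getD, PySem.Dict.get?_insert_self]
    rw [PySem.Dict.insert_insert_self]
    show _ = pvMapVec (nn:Int) (m.insert q (PySem.Set.add (m.getD q ([] : PySem.Set Int)) (i:Int)))
    rw [PySem.Dict.getD_of_not_contains _ _ h']
    rw [pv_insert_mapVec, pvVec_add, pvVec_nil]
    rfl

-- A's inner loop over the questions of one tag, against B's, through the simulation relation
theorem pv_inner_comm (nn : Nat) (i : Nat) (qs : List String)
    (m : PySem.Dict String (PySem.Set Int)) :
    qs.foldl (fun d q =>
        (if d.contains q then d else d.insert q (List.replicate nn (0 : Int))).modify q []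
          (fun v => v.set i 1)) (pvMapVec (nn : Int) m)
    = pvMapVec (nn : Int)
        (qs.foldl (fun d q => d.modify q ([] : PySem.Set Int) (fun s => PySem.Set.add s (i : Int))) m) := by
  induction qs generalizing m with
  | nil => rfl
  | cons q qs ih =>
    simp only [List.foldl_cons]
    rw [show (if (pvMapVec (nn:Int) m).contains q then pvMapVec (nn:Int) m
        else (pvMapVec (nn:Int) m).insert q (List.replicate nn (0:Int))).modify q []
          (fun v => v.set i 1) = pvMapVec (nn:Int) (m.modify q ([] : PySem.Set Int)
            (fun s => PySem.Set.add s (i : Int))) from pv_step_comm nn i m q]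
    exact ih _

-- with Nodup tags, tags.index(tags[k]) = k
theorem pv_index_getElem (l : List String) (h : l.Nodup) (k : Nat) (hk : k < l.length) :
    (PySem.List.index? l l[k]).getD 0 = k := by
  have : PySem.List.index? l l[k] = some k := by
    rw [PySem.List.index?_eq_idxOf?, List.idxOf?_eq_some_iff]
    exact ⟨hk, rfl, fun j hj heq => absurd (h.getElem_inj_iff.mp heq) (by omega)⟩
  rw [this]; rfl

-- A's outer loop (over tags, with tags.index) against B's (over enumerate), in lockstep
theorem pv_outer_comm (p : List (String × List String)) (tags : List String) (hnd : tags.Nodup)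
    (l : List (Int × String))
    (hl : ∀ it ∈ l, ∃ (k : Nat) (hk : k < tags.length), it = ((k : Int), tags[k]))
    (m : PySem.Dict String (PySem.Set Int)) :
    (l.map (·.2)).foldl (fun ques tag =>
        (pvLookup p tag).foldl (fun ques q =>
          (if ques.contains q then ques
           else ques.insert q (List.replicate tags.length (0 : Int))).modify q []
            (fun v => v.set ((PySem.List.index? tags tag).getD 0) 1)) ques)
      (pvMapVec (tags.length : Int) m)
    = pvMapVec (tags.length : Int)
        (l.foldl (fun memb it =>
          (pvLookup p it.2).foldl (fun memb q =>
            memb.modify q ([] : PySem.Set Int) (fun s => PySem.Set.add s it.1)) memb) m) := by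
  induction l generalizing m with
  | nil => rfl
  | cons it l ih =>
    obtain ⟨k, hk, hit⟩ := hl it (List.mem_cons_self)
    subst hit
    simp only [List.map_cons, List.foldl_cons]
    rw [pv_index_getElem tags hnd k hk]
    rw [pv_inner_comm tags.length k (pvLookup p tags[k]) m]
    exact ih (fun x hx => hl x (List.mem_cons_of_mem _ hx)) _

-- ===== VERDICT (by name: the statement is the Claim_ definition above) =====
theorem toColumns_spec : Claim_equal_toColumns := by
  intro p _ hpre
  unfold Spec_toColumns toColumns toColumns_alt
  refine Prod.ext ?_ rfl
  show ((p.map Prod.fst).foldl _ PySem.Dict.empty).items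
      = (((PySem.List.enumerate (p.map Prod.fst)).foldl _ PySem.Dict.empty).items.map _)
  have hsnd : (PySem.List.enumerate (p.map Prod.fst)).map (·.2) = p.map Prod.fst :=
    PySem.List.map_snd_enumerate _ _
  have hl : ∀ it ∈ PySem.List.enumerate (p.map Prod.fst),
      ∃ (k : Nat) (hk : k < (p.map Prod.fst).length), it = ((k : Int), (p.map Prod.fst)[k]) := by
    intro it hit
    obtain ⟨k, hk, hit'⟩ := (PySem.List.mem_enumerate_iff _ _ _).mp hit
    exact ⟨k, hk, by simpa using hit'⟩
  have h0 : pvMapVec ((p.map Prod.fst).length : Int) PySem.Dict.empty = PySem.Dict.empty := rfl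
  have := pv_outer_comm p (p.map Prod.fst) hpre (PySem.List.enumerate (p.map Prod.fst)) hl
      PySem.Dict.empty
  rw [hsnd, h0] at this
  rw [this]
  rfl
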